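-- pv_equiv track=rewrite | github.com/Letitia09/Python-programs | Maximum distinct elements after removing k elements.py | maxoccur
-- ===== SOURCE A (Python) =====
-- import collections
-- import heapq
--
-- def maxoccur(arr,k):
--     d = collections.Counter(arr)
--     heap = [(-value, key) for key,value in d.items()]
--     heapq.heapify(heap)
--     while (heap) and (k > 0):
--         k -= 1
--         x = heapq.heappop(heap)
--         if x[0] < -1:
--             heapq.heappush(heap,(x[0]+1,x[1]))
--     return len(heap)
-- ===== SOURCE B (Python) =====
-- def maxoccur(arr, k):
--     return max(0, min(len(arr) - k, len(set(arr))))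
-- ===== Notes on version B (the rewrite author's own statement) =====
-- stated objective: faster
-- what changed: Replaced the Counter+heap simulation of k greedy removals by the closed form max(0, min(len(arr)-k, len(set(arr)))).
import Mathlib
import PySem

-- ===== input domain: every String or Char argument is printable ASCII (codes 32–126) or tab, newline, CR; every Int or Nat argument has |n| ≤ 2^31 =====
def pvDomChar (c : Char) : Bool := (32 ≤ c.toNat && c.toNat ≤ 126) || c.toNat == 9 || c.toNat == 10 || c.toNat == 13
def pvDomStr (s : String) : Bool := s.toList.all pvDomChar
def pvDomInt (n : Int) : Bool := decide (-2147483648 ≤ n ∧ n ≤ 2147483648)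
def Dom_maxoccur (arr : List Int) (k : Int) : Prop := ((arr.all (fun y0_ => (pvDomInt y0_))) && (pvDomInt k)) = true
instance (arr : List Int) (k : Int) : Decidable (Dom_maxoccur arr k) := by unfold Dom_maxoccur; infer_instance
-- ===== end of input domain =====

-- B replaces A's Counter + heap simulation of k greedy removals by the closed form
-- max(0, min(len(arr)-k, len(set(arr)))) (objective: faster).

-- ===== PORT A =====
-- heapq on the distinct tuples (-count, key): heapify arranges the same elements,
-- heappop removes exactly the lexicographically least tuple, heappush adds one tuple.
-- We port the heap as the list of its elements (the tuples are pairwise distinct since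
-- their keys are): pop = remove the lex-least element, push = cons. This is exact for
-- everything A observes about the heap (each popped tuple and len(heap)).

-- the lex minimum of x :: xs under Python's tuple order (what heappop returns)
def lexMin (x : Int × Int) (xs : List (Int × Int)) : Int × Int :=
  xs.foldl (fun m y => if y.1 < m.1 ∨ (y.1 = m.1 ∧ y.2 < m.2) then y else m) x

-- 'while heap and k > 0: k -= 1; x = heappop(heap); if x[0] < -1: heappush(heap, (x[0]+1, x[1]))'
-- followed by 'return len(heap)'
def maxoccurLoop (heap : List (Int × Int)) (k : Int) : Int :=
  match heap with
  | [] => PySem.List.len ([] : List (Int × Int))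
  | x :: xs =>
    if h : k > 0 then
      let m := lexMin x xs
      let rest := (x :: xs).erase m
      if m.1 < -1 then maxoccurLoop ((m.1 + 1, m.2) :: rest) (k - 1)
      else maxoccurLoop rest (k - 1)
    else PySem.List.len (x :: xs)
termination_by k.toNat
decreasing_by all_goals omega

def maxoccur (arr : List Int) (k : Int) : Int :=
  let d := PySem.Dict.counter arr
  let heap := d.items.map (fun kv => (-kv.2, kv.1))
  maxoccurLoop heap k

-- ===== PORT B =====
def maxoccur_alt (arr : List Int) (k : Int) : Int :=
  max 0 (min (PySem.List.len arr - k) (PySem.Set.len (PySem.Set.ofList arr)))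

-- ===== PRECONDITION & SPEC =====
def Spec_maxoccur (arr : List Int) (k : Int) (out : Int) : Prop := out = maxoccur_alt arr k
instance (arr : List Int) (k : Int) (out : Int) : Decidable (Spec_maxoccur arr k out) := by unfold Spec_maxoccur; infer_instance

-- ===== CLAIM (what is proved, stated in full; the proofs are below) =====
def Claim_equal_maxoccur : Prop := ∀ (arr : List Int) (k : Int), Dom_maxoccur arr k → Spec_maxoccur arr k (maxoccur arr k)

-- ===== LEMMAS AND PROOFS =====

theorem lexMin_spec (xs : List (Int × Int)) : ∀ x : Int × Int,
    lexMin x xs ∈ x :: xs ∧ ∀ y ∈ x :: xs, (lexMin x xs).1 ≤ y.1 := by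
  induction xs with
  | nil =>
    intro x
    refine ⟨by simp [lexMin], ?_⟩
    intro y hy
    simp only [List.mem_cons, List.not_mem_nil, or_false] at hy
    simp [lexMin, hy]
  | cons z zs ih =>
    intro x
    have step : lexMin x (z :: zs)
        = lexMin (if z.1 < x.1 ∨ (z.1 = x.1 ∧ z.2 < x.2) then z else x) zs := rfl
    set w := if z.1 < x.1 ∨ (z.1 = x.1 ∧ z.2 < x.2) then z else x with hw
    have hw1 : w = z ∨ w = x := by rw [hw]; split_ifs <;> simp
    have hwle : w.1 ≤ x.1 ∧ w.1 ≤ z.1 := by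
      rw [hw]; split_ifs with hc
      · constructor <;> omega
      · push Not at hc
        exact ⟨le_rfl, hc.1⟩
    obtain ⟨hmem, hle⟩ := ih w
    constructor
    · rw [step]
      rcases List.mem_cons.mp hmem with h | h
      · rw [h]; rcases hw1 with h2 | h2 <;> simp [h2]
      · simp [h]
    · intro y hy
      rw [step]
      have hlw : (lexMin w zs).1 ≤ w.1 := hle w (by simp)
      simp only [List.mem_cons] at hy
      rcases hy with hy | hy | hy
      · subst hy; omega
      · subst hy; omega
      · exact hle y (by simp [hy])

theorem lexMin_mem (x : Int × Int) (xs : List (Int × Int)) : lexMin x xs ∈ x :: xs :=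
  (lexMin_spec xs x).1

theorem lexMin_fst_le (x : Int × Int) (xs : List (Int × Int)) :
    ∀ y ∈ x :: xs, (lexMin x xs).1 ≤ y.1 :=
  (lexMin_spec xs x).2

theorem sum_fst_le_neg_len (heap : List (Int × Int)) (h : ∀ x ∈ heap, x.1 ≤ -1) :
    ((heap.map Prod.fst).sum : Int) ≤ -(heap.length : Int) := by
  induction heap with
  | nil => simp
  | cons x xs ih =>
    have hx := h x (by simp)
    have := ih (fun y hy => h y (by simp [hy]))
    simp only [List.map_cons, List.sum_cons, List.length_cons]
    push_cast
    omega

theorem sum_fst_eq_neg_len (heap : List (Int × Int)) (h : ∀ x ∈ heap, x.1 = -1) :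
    ((heap.map Prod.fst).sum : Int) = -(heap.length : Int) := by
  induction heap with
  | nil => simp
  | cons x xs ih =>
    have hx := h x (by simp)
    have := ih (fun y hy => h y (by simp [hy]))
    simp only [List.map_cons, List.sum_cons, List.length_cons]
    push_cast
    omega

-- the loop's value in closed form, by induction on k.toNat
theorem maxoccurLoop_spec (n : Nat) : ∀ (k : Int) (heap : List (Int × Int)),
    k.toNat = n → (∀ x ∈ heap, x.1 ≤ -1) →
    maxoccurLoop heap k = max 0 (min (heap.length : Int) (-((heap.map Prod.fst).sum) - k)) := by
  induction n with
  | zero =>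
    intro k heap hk hinv
    have hk0 : k ≤ 0 := by omega
    match heap with
    | [] => simp [maxoccurLoop, PySem.List.len]
    | x :: xs =>
      have hS := sum_fst_le_neg_len (x :: xs) hinv
      rw [maxoccurLoop, dif_neg (by omega)]
      simp only [PySem.List.len_eq, List.length_cons] at *
      omega
  | succ n ih =>
    intro k heap hk hinv
    have hkpos : k > 0 := by omega
    match heap with
    | [] => simp [maxoccurLoop, PySem.List.len]
    | x :: xs =>
      rw [maxoccurLoop, dif_pos hkpos]
      set m := lexMin x xs with hm
      have hmem : m ∈ x :: xs := lexMin_mem x xs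
      have hperm : (x :: xs).Perm (m :: (x :: xs).erase m) := List.perm_cons_erase hmem
      have hlen : ((x :: xs).length : Int) = (((x :: xs).erase m).length : Int) + 1 := by
        have := hperm.length_eq
        simp only [List.length_cons] at this ⊢
        omega
      have hsum : ((x :: xs).map Prod.fst).sum = m.1 + (((x :: xs).erase m).map Prod.fst).sum := by
        have := (hperm.map Prod.fst).sum_eq
        simpa using this
      have hrestinv : ∀ y ∈ (x :: xs).erase m, y.1 ≤ -1 :=
        fun y hy => hinv y (List.mem_of_mem_erase hy)
      have hminv := hinv m hmem
      by_cases hlt : m.1 < -1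
      · rw [if_pos hlt]
        rw [ih (k - 1) ((m.1 + 1, m.2) :: (x :: xs).erase m) (by omega)
          (by intro y hy
              rcases List.mem_cons.mp hy with hy | hy
              · rw [hy]; omega
              · exact hrestinv y hy)]
        rw [hsum, hlen]
        simp only [List.map_cons, List.sum_cons, List.length_cons]
        push_cast
        omega
      · rw [if_neg hlt]
        have hall : ∀ y ∈ x :: xs, y.1 = -1 := by
          intro y hy
          have h1 := lexMin_fst_le x xs y hy
          rw [← hm] at h1
          have h2 := hinv y hy
          omega
        rw [ih (k - 1) ((x :: xs).erase m) (by omega) hrestinv]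
        rw [sum_fst_eq_neg_len _ (fun y hy => hall y (List.mem_of_mem_erase hy)),
            sum_fst_eq_neg_len _ hall, hlen]
        omega

-- the negated multiplicities over the distinct elements sum to minus the length
theorem sum_negcount_ofList (arr : List Int) :
    ((PySem.Set.ofList arr).map (fun v => -(arr.count v : Int))).sum = -(arr.length : Int) := by
  have hperm : (PySem.Set.ofList arr).Perm arr.dedup := by
    apply (List.perm_ext_iff_of_nodup (PySem.Set.nodup_ofList arr) arr.nodup_dedup).mpr
    intro a
    rw [PySem.Set.mem_ofList, List.mem_dedup]
  rw [(hperm.map (fun v => -(arr.count v : Int))).sum_eq]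
  have hcast : (arr.dedup.map (fun v => -(arr.count v : Int))).sum
      = -(((arr.dedup.map (fun v => arr.count v)).sum : Nat) : Int) := by
    induction arr.dedup with
    | nil => simp
    | cons y ys ih => simp only [List.map_cons, List.sum_cons, ih]; push_cast; ring
  rw [hcast, List.sum_map_count_dedup_eq_length]

-- ===== VERDICT (by name: the statement is the Claim_ definition above) =====
theorem maxoccur_spec : Claim_equal_maxoccur := by
  intro arr k _
  unfold Spec_maxoccur maxoccur maxoccur_alt
  simp only [PySem.Dict.items_counter, List.map_map]
  set heap := (PySem.Set.ofList arr).map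
    ((fun kv : Int × Int => (-kv.2, kv.1)) ∘ (fun v => (v, (arr.count v : Int)))) with hheap
  have hinv : ∀ x ∈ heap, x.1 ≤ -1 := by
    intro x hx
    rw [hheap] at hx
    obtain ⟨v, hv, hxv⟩ := List.mem_map.mp hx
    have hvarr : v ∈ arr := (PySem.Set.mem_ofList arr v).mp hv
    have hc : 1 ≤ arr.count v := List.count_pos_iff.mpr hvarr
    rw [← hxv]
    simp only [Function.comp_apply]
    omega
  rw [maxoccurLoop_spec k.toNat k heap rfl hinv]
  have hlen : (heap.length : Int) = PySem.Set.len (PySem.Set.ofList arr) := by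
    rw [hheap]; simp [PySem.Set.len]
  have hsum : (heap.map Prod.fst).sum = -(arr.length : Int) := by
    rw [hheap, List.map_map]
    rw [show (Prod.fst ∘ ((fun kv : Int × Int => (-kv.2, kv.1)) ∘ (fun v => (v, (arr.count v : Int)))))
        = (fun v => -(arr.count v : Int)) from rfl]
    rw [sum_negcount_ofList]
  rw [hsum, hlen, PySem.List.len_eq]
  omega
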